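-- pv_equiv track=rewrite | github.com/Coreopsis-cyber/Crossdating | machine_learning_method.py | training_data_for_third_mlp
-- ===== SOURCE A (Python) =====
-- def training_data_for_third_mlp(pairs, correct_pairs):
--     """Creates a list of outputs for the training data"""
--     binary = []
--     correct_pairs = [item for sublist in correct_pairs for item in sublist]
--     for i in range(len(pairs)):
--         if pairs[i] in correct_pairs:
--             binary.append(1)
--         else:
--             binary.append(0)
--     return binary
-- ===== SOURCE B (Python) =====
-- def training_data_for_third_mlp(pairs, correct_pairs):
--     """Creates a list of outputs for the training data"""
--     result = [0] * len(pairs)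
--     index = {}
--     for i, v in enumerate(pairs):
--         index[v] = index.get(v, []) + [i]
--     for sub in correct_pairs:
--         for item in sub:
--             for j in index.get(item, []):
--                 result[j] = 1
--     return result
-- ===== Notes on version B (the rewrite author's own statement) =====
-- stated objective: faster
-- what changed: Instead of scanning the flattened correct list once per pair (membership test inside a loop), B builds a dict from each value to its positions in pairs in one pass and then flags those positions while scanning the correct items once.
import Mathlib
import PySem

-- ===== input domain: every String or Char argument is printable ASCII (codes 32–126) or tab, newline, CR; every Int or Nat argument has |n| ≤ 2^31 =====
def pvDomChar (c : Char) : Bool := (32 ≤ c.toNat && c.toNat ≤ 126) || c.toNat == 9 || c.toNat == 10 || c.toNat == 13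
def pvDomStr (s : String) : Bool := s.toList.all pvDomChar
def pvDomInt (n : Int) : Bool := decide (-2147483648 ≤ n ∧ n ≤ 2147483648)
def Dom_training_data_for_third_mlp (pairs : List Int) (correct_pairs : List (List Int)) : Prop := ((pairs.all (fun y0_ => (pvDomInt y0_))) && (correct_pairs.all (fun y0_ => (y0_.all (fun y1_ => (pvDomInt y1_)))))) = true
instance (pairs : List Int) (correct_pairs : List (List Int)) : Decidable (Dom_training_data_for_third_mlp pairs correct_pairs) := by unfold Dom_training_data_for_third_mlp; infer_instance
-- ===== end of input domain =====

-- B replaces A's per-pair scan of the flattened correct list by a one-pass value→positions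
-- index of `pairs`, then flags positions while scanning the correct items once (objective: faster).

-- B replaces A's per-pair scan of the flattened correct list by a one-pass value->positions
-- index of `pairs`, then flags those positions while scanning the correct items once (objective: faster).

-- ===== PORT A =====
def training_data_for_third_mlp (pairs : List Int) (correct_pairs : List (List Int)) : List Int :=
  let cp : List Int := correct_pairs.foldl (fun acc sublist => acc ++ sublist) []
  (PySem.List.pyRange 0 pairs.length 1).foldl
    (fun binary i =>
      if cp.contains (PySem.List.pyGetD pairs i 0) then binary ++ [1] else binary ++ [0]) []

def training_data_for_third_mlp_alt (pairs : List Int) (correct_pairs : List (List Int)) : List Int :=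
  let result : List Int := List.replicate pairs.length 0
  let index : PySem.Dict Int (List Int) :=
    (PySem.List.enumerate pairs 0).foldl
      (fun d p => d.insert p.2 (d.getD p.2 [] ++ [p.1])) PySem.Dict.empty
  correct_pairs.foldl (fun r sub =>
    sub.foldl (fun r item =>
      (index.getD item []).foldl (fun r j => PySem.List.pySetD r j 1) r) r) result

-- ===== PRECONDITION & SPEC =====
def Spec_training_data_for_third_mlp (pairs : List Int) (correct_pairs : List (List Int)) (out : List Int) : Prop := out = training_data_for_third_mlp_alt pairs correct_pairs
instance (pairs : List Int) (correct_pairs : List (List Int)) (out : List Int) : Decidable (Spec_training_data_for_third_mlp pairs correct_pairs out) := by unfold Spec_training_data_for_third_mlp; infer_instance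

-- ===== CLAIM (what is proved, stated in full; the proofs are below) =====
def Claim_equal_training_data_for_third_mlp : Prop := ∀ (pairs : List Int) (correct_pairs : List (List Int)), Dom_training_data_for_third_mlp pairs correct_pairs → Spec_training_data_for_third_mlp pairs correct_pairs (training_data_for_third_mlp pairs correct_pairs)

-- ===== LEMMAS AND PROOFS =====

def dstep (d : PySem.Dict Int (List Int)) (p : Int × Int) : PySem.Dict Int (List Int) :=
  d.insert p.2 (d.getD p.2 [] ++ [p.1])

theorem index_getD (pairs : List Int) (s : Int) (d : PySem.Dict Int (List Int)) (v : Int) :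
    (((PySem.List.enumerate pairs s).foldl dstep d).getD v []) =
      d.getD v [] ++ ((PySem.List.enumerate pairs s).filter (fun p => p.2 == v)).map (·.1) := by
  induction pairs generalizing s d with
  | nil => simp [PySem.List.enumerate_nil]
  | cons x xs ih =>
    rw [PySem.List.enumerate_cons]
    simp only [List.foldl_cons, List.filter_cons]
    by_cases h : x = v
    · subst h
      simp only [beq_self_eq_true, if_pos]
      rw [ih]
      simp [dstep, PySem.Dict.getD_insert_self]
    · have hb : ((s, x).2 == v) = false := by simp [h]
      simp only [hb, Bool.false_eq_true, if_false]
      rw [ih]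
      simp only [dstep]; rw [PySem.Dict.getD_insert_of_ne (hne := fun e => h e.symm)]

def posL (pairs : List Int) (v : Int) : List Int :=
  ((PySem.List.enumerate pairs 0).filter (fun p => p.2 == v)).map (·.1)

theorem mem_posL (pairs : List Int) (v : Int) (k : Nat) :
    ((k : Int) ∈ posL pairs v) ↔ ∃ h : k < pairs.length, pairs[k] = v := by
  simp only [posL, List.mem_map, List.mem_filter, PySem.List.mem_enumerate_iff]
  constructor
  · rintro ⟨p, ⟨⟨k', hk', rfl⟩, hv⟩, hfst⟩
    simp at hv hfst
    subst hfst
    exact ⟨hk', hv⟩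
  · rintro ⟨hk, hv⟩
    exact ⟨((k : Int), pairs[k]), ⟨⟨k, hk, by simp⟩, by simpa using hv⟩, rfl⟩

theorem nonneg_posL (pairs : List Int) (v : Int) : ∀ j ∈ posL pairs v, 0 ≤ j := by
  intro j hj
  simp only [posL, List.mem_map, List.mem_filter, PySem.List.mem_enumerate_iff] at hj
  obtain ⟨p, ⟨⟨k, hk, rfl⟩, -⟩, rfl⟩ := hj
  simp

theorem length_setfold (S : List Int) (r : List Int) :
    (S.foldl (fun r j => PySem.List.pySetD r j 1) r).length = r.length := by
  induction S generalizing r with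
  | nil => rfl
  | cons j S ih => simp only [List.foldl_cons]; rw [ih, PySem.List.length_pySetD]

theorem getElem?_setfold (S : List Int) (r : List Int) (hS : ∀ j ∈ S, 0 ≤ j) (k : Nat) :
    (S.foldl (fun r j => PySem.List.pySetD r j 1) r)[k]? =
      if (k : Int) ∈ S ∧ k < r.length then some 1 else r[k]? := by
  induction S generalizing r with
  | nil => simp
  | cons j S ih =>
    simp only [List.foldl_cons]
    rw [ih _ (fun x hx => hS x (List.mem_cons_of_mem _ hx))]
    rw [PySem.List.pySetD_of_nonneg (h := hS j (List.mem_cons_self ..))]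
    have hlen : (r.set j.toNat 1).length = r.length := by simp
    rw [hlen]
    by_cases hmem : (k : Int) ∈ S ∧ k < r.length
    · simp [hmem, List.mem_cons]
    · simp only [if_neg hmem]
      by_cases hk : k < r.length
      · have hns : ¬ (k : Int) ∈ S := fun h => hmem ⟨h, hk⟩
        by_cases hjk : j.toNat = k
        · have hj0 := hS j (List.mem_cons_self ..)
          have : (k : Int) = j := by omega
          simp [List.mem_cons, this.symm, hns, hk]
        · have : ¬ ((k : Int) = j ∨ (k : Int) ∈ S) := by
            rintro (h | h)
            · exact hjk (by omega)
            · exact hns h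
          simp [hjk, List.mem_cons, this]
      · have : ¬ ((k:Int) ∈ j :: S ∧ k < r.length) := fun h => hk h.2
        rw [if_neg this]
        rw [List.getElem?_eq_none (by simpa using Nat.le_of_not_lt hk),
            List.getElem?_eq_none (by omega)]

theorem length_flagfold (pairs : List Int) (F : List Int) (r : List Int) :
    (F.foldl (fun r item => (posL pairs item).foldl (fun r j => PySem.List.pySetD r j 1) r) r).length
      = r.length := by
  induction F generalizing r with
  | nil => rfl
  | cons x F ih => simp only [List.foldl_cons]; rw [ih, length_setfold]

theorem getElem?_flagfold (pairs : List Int) (F : List Int) (r : List Int)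
    (hr : r.length = pairs.length) (k : Nat) (hk : k < pairs.length) :
    (F.foldl (fun r item => (posL pairs item).foldl (fun r j => PySem.List.pySetD r j 1) r) r)[k]? =
      if pairs[k] ∈ F then some 1 else r[k]? := by
  induction F generalizing r with
  | nil => simp
  | cons x F ih =>
    simp only [List.foldl_cons]
    rw [ih _ (by rw [length_setfold]; exact hr)]
    rw [getElem?_setfold _ _ (nonneg_posL pairs x) k]
    by_cases hm : pairs[k] ∈ F
    · simp [hm, List.mem_cons]
    · simp only [if_neg hm]
      by_cases hx : pairs[k] = x
      · have : (k : Int) ∈ posL pairs x := (mem_posL pairs x k).2 ⟨hk, hx⟩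
        simp [List.mem_cons, hx, this, hr, hk]
      · have : ¬ (k : Int) ∈ posL pairs x := fun h => hx ((mem_posL pairs x k).1 h).2
        simp [List.mem_cons, hx, hm, this]

theorem A_eq_map (pairs : List Int) (correct_pairs : List (List Int)) :
    training_data_for_third_mlp pairs correct_pairs =
      pairs.map (fun v => if correct_pairs.flatten.contains v then (1:Int) else 0) := by
  unfold training_data_for_third_mlp
  rw [PySem.List.foldl_append_eq_flatten, List.nil_append]
  rw [PySem.List.foldl_pyRange_zero_pyGetD' pairs 0
    (fun binary v => if correct_pairs.flatten.contains v then binary ++ [1] else binary ++ [0]) []]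
  have : (fun (binary : List Int) (v : Int) =>
      if correct_pairs.flatten.contains v then binary ++ [1] else binary ++ [0]) =
      (fun binary v => binary ++ [if correct_pairs.flatten.contains v then 1 else 0]) := by
    funext b v; split <;> rfl
  rw [this, PySem.List.foldl_append_singleton_eq_map, List.nil_append]

theorem B_char (pairs : List Int) (correct_pairs : List (List Int)) :
    training_data_for_third_mlp_alt pairs correct_pairs =
      correct_pairs.flatten.foldl
        (fun r item => (posL pairs item).foldl (fun r j => PySem.List.pySetD r j 1) r)
        (List.replicate pairs.length 0) := by
  unfold training_data_for_third_mlp_alt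
  simp only
  rw [← List.foldl_flatten]
  congr 1
  funext r item
  congr 1
  rw [show (fun (d : PySem.Dict Int (List Int)) (p : Int × Int) =>
        d.insert p.2 (d.getD p.2 [] ++ [p.1])) = dstep from rfl]
  rw [index_getD]
  simp [posL]

theorem main_eq (pairs : List Int) (correct_pairs : List (List Int)) :
    training_data_for_third_mlp pairs correct_pairs =
      training_data_for_third_mlp_alt pairs correct_pairs := by
  rw [A_eq_map, B_char]
  apply List.ext_getElem?
  intro k
  by_cases hk : k < pairs.length
  · rw [getElem?_flagfold pairs _ _ (by simp) k hk]
    rw [List.getElem?_map, List.getElem?_eq_getElem hk]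
    by_cases hm : pairs[k] ∈ correct_pairs.flatten
    · simp only [if_pos hm]; simp [-List.mem_flatten, hm]
    · simp only [if_neg hm]; simp [-List.mem_flatten, hm, hk]
  · rw [List.getElem?_eq_none (by simpa using Nat.le_of_not_lt hk),
        List.getElem?_eq_none (by rw [length_flagfold]; simpa using Nat.le_of_not_lt hk)]

-- ===== VERDICT (by name: the statement is the Claim_ definition above) =====
theorem training_data_for_third_mlp_spec : Claim_equal_training_data_for_third_mlp := by
  intro pairs correct_pairs _
  unfold Spec_training_data_for_third_mlp
  exact main_eq pairs correct_pairs
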